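-- pv_equiv track=rewrite | github.com/kaluginpeter/Algorithms_and_structures_tasks | Python_Solutions/CodeWars/6kyu/Simple_Fun_#46_Cipher26.py | cipher26
-- ===== SOURCE A (Python) =====
-- def cipher26(message):
--     l, al, step, sum = [], 'abcdefghijklmnopqrstuvwxyz', 0, 0
--     for i in message:
--         while (sum + step) % 26 != al.index(i):
--             step += 1
--         sum += step
--         l.append(al[step])
--         step = 0
--     return ''.join(l)
-- ===== SOURCE B (Python) =====
-- def cipher26(message):
--     al = 'abcdefghijklmnopqrstuvwxyz'
--     prev = 0
--     out = []
--     for c in message: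
--         cur = al.index(c)
--         out.append(al[(cur - prev) % 26])
--         prev = cur
--     return ''.join(out)
-- ===== Notes on version B (the rewrite author's own statement) =====
-- stated objective: faster
-- what changed: B replaces A's inner while-loop linear search for the step (and the running cumulative sum) with a direct modular subtraction of the previous letter's alphabet index from the current one, keeping only the previous index.
import Mathlib
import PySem

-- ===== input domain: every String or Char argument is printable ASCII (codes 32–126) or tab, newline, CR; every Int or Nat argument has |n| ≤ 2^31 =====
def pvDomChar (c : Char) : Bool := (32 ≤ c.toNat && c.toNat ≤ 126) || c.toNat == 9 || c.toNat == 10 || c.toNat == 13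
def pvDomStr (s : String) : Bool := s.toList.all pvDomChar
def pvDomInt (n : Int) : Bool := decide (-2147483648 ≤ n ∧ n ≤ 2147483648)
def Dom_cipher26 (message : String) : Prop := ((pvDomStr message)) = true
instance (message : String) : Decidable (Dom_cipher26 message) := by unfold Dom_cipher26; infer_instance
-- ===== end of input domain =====

-- B replaces A's inner while-loop search for the step with a direct modular subtraction; objective: faster (constant factor, measured).

def pvAl : List Char := "abcdefghijklmnopqrstuvwxyz".toList

-- ===== PORT A =====
-- the 'while (sum + step) % 26 != al.index(i): step += 1' loop; fuel 27 suffices because the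
-- target index is in [0,26), so the search always stops within 26 increments.
def pvFindStep (sum target step : Int) : Nat → Int
  | 0 => step
  | fuel+1 =>
    if PySem.Int.mod (sum + step) 26 ≠ target then pvFindStep sum target (step + 1) fuel
    else step

-- the 'for i in message' loop of A; none = ValueError from al.index(i) (or an out-of-range al[step], unreachable)
def pvAGo : List Char → Int → List Char → Option (List Char)
  | [], _, acc => some acc
  | i :: rest, sum, acc =>
    match PySem.List.index? pvAl i with
    | none => none
    | some t =>
      let step := pvFindStep sum (t : Int) 0 27
      match PySem.List.pyGet? pvAl step with
      | none => none
      | some ch => pvAGo rest (sum + step) (acc ++ [ch])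

def cipher26 (message : String) : String :=
  match pvAGo message.toList 0 [] with
  | some l => String.ofList l
  | none => ""   -- unreachable under Pre_cipher26 (Python raises ValueError)

-- ===== PORT B =====
-- the 'for c in message' loop of B; none = ValueError from al.index(c)
def pvBGo : List Char → Int → List Char → Option (List Char)
  | [], _, acc => some acc
  | c :: rest, prev, acc =>
    match PySem.List.index? pvAl c with
    | none => none
    | some cur =>
      match PySem.List.pyGet? pvAl (PySem.Int.mod ((cur : Int) - prev) 26) with
      | none => none
      | some ch => pvBGo rest (cur : Int) (acc ++ [ch])

def cipher26_alt (message : String) : String :=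
  match pvBGo message.toList 0 [] with
  | some l => String.ofList l
  | none => ""   -- unreachable under Pre_cipher26 (Python raises ValueError)

-- ===== PRECONDITION & SPEC =====
-- Pre_ excludes messages containing a character that is not a lowercase ASCII letter: there Python's al.index raises ValueError (in A and in B alike).
def Pre_cipher26 (message : String) : Prop := message.toList.all (fun c => c ∈ pvAl) = true
instance (message : String) : Decidable (Pre_cipher26 message) := by unfold Pre_cipher26; infer_instance

def pvWitness_cipher26 : String := "crazy"

def Spec_cipher26 (message : String) (out : String) : Prop := out = cipher26_alt message
instance (message : String) (out : String) : Decidable (Spec_cipher26 message out) := by unfold Spec_cipher26; infer_instance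

-- ===== CLAIM (what is proved, stated in full; the proofs are below) =====
def Claim_equal_cipher26 : Prop := ∀ (message : String), Dom_cipher26 message → Pre_cipher26 message → Spec_cipher26 message (cipher26 message)

-- ===== LEMMAS AND PROOFS =====

theorem pvFindStep_eq (t : Int) (ht0 : 0 ≤ t) (ht : t < 26) :
    ∀ (fuel : Nat) (sum step : Int), 0 ≤ step → step ≤ (t - sum) % 26 →
      (t - sum) % 26 < step + fuel →
      pvFindStep sum t step fuel = (t - sum) % 26 := by
  intro fuel
  induction fuel with
  | zero => intro sum step _ _ _; omega
  | succ n ih =>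
    intro sum step hs0 hle hlt
    unfold pvFindStep
    rw [PySem.Int.mod_eq_emod_of_pos (by omega)]
    by_cases h : (sum + step) % 26 = t
    · simp only [h, ne_eq, not_true_eq_false, if_false]
      omega
    · simp only [ne_eq, h, not_false_eq_true, if_true]
      apply ih
      · omega
      · omega
      · omega

theorem pvGo_eq : ∀ (l : List Char) (sum prev : Int) (acc : List Char),
    (∀ c ∈ l, c ∈ pvAl) → 0 ≤ prev → prev < 26 → sum % 26 = prev →
    pvAGo l sum acc = pvBGo l prev acc := by
  intro l
  induction l with
  | nil => intro sum prev acc _ _ _ _; rfl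
  | cons c rest ih =>
    intro sum prev acc hmem hp0 hp hinv
    have hc : c ∈ pvAl := hmem c (List.mem_cons_self ..)
    obtain ⟨t, hidx⟩ : ∃ t, PySem.List.index? pvAl c = some t := by
      have := (PySem.List.index?_isSome_iff (xs := pvAl) (v := c)).2 hc
      exact Option.isSome_iff_exists.mp this
    obtain ⟨hk, -, -⟩ := PySem.List.getElem_of_index?_eq_some hidx
    have hlen : pvAl.length = 26 := by decide
    have ht26 : (t : Int) < 26 := by omega
    have hstep : pvFindStep sum (t : Int) 0 27 = ((t : Int) - sum) % 26 := by
      apply pvFindStep_eq _ (by omega) ht26 27 sum 0 le_rfl <;> omega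
    have hmodeq : ((t : Int) - sum) % 26 = ((t : Int) - prev) % 26 := by omega
    have hmod : PySem.Int.mod ((t : Int) - prev) 26 = ((t : Int) - prev) % 26 :=
      PySem.Int.mod_eq_emod_of_pos (by omega)
    have hrange : 0 ≤ ((t : Int) - prev) % 26 ∧ ((t : Int) - prev) % 26 < 26 := by omega
    obtain ⟨ch, hch⟩ : ∃ ch, PySem.List.pyGet? pvAl (((t : Int) - prev) % 26) = some ch := by
      exact ⟨_, PySem.List.pyGet?_eq_some_getElem _ hrange.1 (by omega)⟩
    simp only [pvAGo, pvBGo, hidx, hstep, hmodeq, hmod, hch]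
    apply ih
    · exact fun x hx => hmem x (List.mem_cons_of_mem _ hx)
    · omega
    · omega
    · omega

-- ===== VERDICT (by name: the statement is the Claim_ definition above) =====
theorem cipher26_spec : Claim_equal_cipher26 := by
  intro message _ hpre
  unfold Pre_cipher26 at hpre
  simp only [List.all_eq_true, decide_eq_true_eq] at hpre
  unfold Spec_cipher26 cipher26 cipher26_alt
  rw [pvGo_eq message.toList 0 0 [] hpre (by omega) (by omega) (by omega)]
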